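-- pv_equiv track=rewrite | github.com/oaqa/FlexNeuART | scripts/data_convert/convert_common.py | build_query_id_to_partition
-- ===== SOURCE A (Python) =====
-- def build_query_id_to_partition(query_ids, sizes):
--     """Partition a given list of query IDs.
--
--     :param query_ids:   an input array of query IDs.
--     :param sizes:       partion sizes
--
--     :return:  a dictionary that maps each query ID to its respective partition ID
--     """
--     assert sum(sizes) == len(query_ids)
--     query_id_to_partition = dict()
--     start = 0
--     for part_id in range(len(sizes)):
--         end = start + sizes[part_id]
--         for k in range(start, end):
--             query_id_to_partition[query_ids[k]] = part_id
--         start = end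
--
--     return query_id_to_partition
-- ===== SOURCE B (Python) =====
-- def build_query_id_to_partition(query_ids, sizes):
--     """Partition a given list of query IDs.
--
--     :param query_ids:   an input array of query IDs.
--     :param sizes:       partion sizes
--
--     :return:  a dictionary that maps each query ID to its respective partition ID
--     """
--     assert sum(sizes) == len(query_ids)
--     # Prefix sums of the partition sizes; partition of index i is the least p
--     # with cum[p] > i, found by binary search (sizes are non-negative, so cum
--     # is non-decreasing).
--     cum = []
--     total = 0
--     for sz in sizes:
--         total += sz
--         cum.append(total)
--     res = {}
--     for i, qid in enumerate(query_ids):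
--         lo, hi = 0, len(cum)
--         while lo < hi:
--             mid = (lo + hi) // 2
--             if cum[mid] <= i:
--                 lo = mid + 1
--             else:
--                 hi = mid
--         res[qid] = lo
--     return res
-- ===== Notes on version B (the rewrite author's own statement) =====
-- stated objective: alternative
-- what changed: B replaces A's per-partition expansion with sliding start/end offsets by building the prefix-sum array of sizes once and, for each query index, locating its partition with a hand-written binary search over the prefix sums.
-- outside the precondition, e.g. on build_query_id_to_partition(['a', 'b'], [-1, 3]): A returns {'b': 1, 'a': 1}, B returns {'a': 1, 'b': 1}; on build_query_id_to_partition(['a', 'b'], [3, -1]): A raises IndexError, B returns {'a': 0, 'b': 0}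
import Mathlib
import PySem

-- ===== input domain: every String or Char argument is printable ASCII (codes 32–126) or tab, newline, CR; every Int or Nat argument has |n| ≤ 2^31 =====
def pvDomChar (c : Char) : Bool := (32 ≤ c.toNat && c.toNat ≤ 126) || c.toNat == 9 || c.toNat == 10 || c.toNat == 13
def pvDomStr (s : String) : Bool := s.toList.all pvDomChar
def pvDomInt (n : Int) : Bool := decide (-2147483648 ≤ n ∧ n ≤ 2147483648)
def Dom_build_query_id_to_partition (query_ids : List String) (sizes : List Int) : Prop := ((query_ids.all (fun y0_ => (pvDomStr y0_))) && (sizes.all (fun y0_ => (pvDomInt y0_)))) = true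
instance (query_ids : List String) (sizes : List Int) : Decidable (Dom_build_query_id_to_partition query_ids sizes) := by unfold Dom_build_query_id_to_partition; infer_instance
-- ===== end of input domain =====

-- B replaces A's per-partition expansion with sliding offsets by a prefix-sum array of the sizes plus a binary search per query index (objective: alternative; equal asymptotic cost here).


-- ===== PORT A =====
def build_query_id_to_partition (query_ids : List String) (sizes : List Int) : List (String × Int) :=
  -- assert sum(sizes) == len(query_ids): on failure Python raises AssertionError (outside Pre_); the port returns [].
  if sizes.sum = (query_ids.length : Int) then
    (((PySem.List.pyRange 0 (sizes.length : Int) 1).foldl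
        (fun (st : PySem.Dict String Int × Int) part_id =>
          let e := st.2 + PySem.List.pyGetD sizes part_id 0
          ((PySem.List.pyRange st.2 e 1).foldl
              (fun d k => d.insert (PySem.List.pyGetD query_ids k "") part_id) st.1,
           e))
        (PySem.Dict.empty, 0)).1).items
  else []

-- ===== PORT B =====
-- the `while lo < hi` binary-search loop of Source B (mid = (lo+hi)//2 is inlined at its two
-- uses; cum[mid] is in range whenever the loop runs under Pre_, so pyGetD's default is unused)
def pvBsearch (cum : List Int) (i : Int) (lo hi : Int) : Int :=
  if lo < hi then
    if PySem.List.pyGetD cum (PySem.Int.floordiv (lo + hi) 2) 0 ≤ i then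
      pvBsearch cum i (PySem.Int.floordiv (lo + hi) 2 + 1) hi
    else
      pvBsearch cum i lo (PySem.Int.floordiv (lo + hi) 2)
  else lo
termination_by (hi - lo).toNat
decreasing_by
  · have h1 := (PySem.Int.le_floordiv_iff_mul_le (a := lo + hi) (b := 2) (q := lo) (by omega)).2 (by omega)
    omega
  · have h2 := (PySem.Int.floordiv_lt_iff_lt_mul (a := lo + hi) (b := 2) (q := hi) (by omega)).2 (by omega)
    omega

def build_query_id_to_partition_alt (query_ids : List String) (sizes : List Int) : List (String × Int) :=
  -- assert sum(sizes) == len(query_ids): on failure Python raises AssertionError (outside Pre_); the port returns [].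
  if sizes.sum = (query_ids.length : Int) then
    let cum := (sizes.foldl (fun (st : List Int × Int) sz =>
        let total := st.2 + sz
        (st.1 ++ [total], total)) ([], 0)).1
    ((PySem.List.enumerate query_ids).foldl
        (fun (d : PySem.Dict String Int) pr =>
          d.insert pr.2 (pvBsearch cum pr.1 0 (cum.length : Int)))
        PySem.Dict.empty).items
  else []

-- ===== PRECONDITION & SPEC =====
-- Pre_ excludes inputs with a negative partition size (on which A's negative-index wraparound —
-- sometimes an IndexError — and B's binary search over a non-monotone prefix-sum array are both
-- accidental) and inputs failing A's assert (AssertionError).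
def Pre_build_query_id_to_partition (query_ids : List String) (sizes : List Int) : Prop :=
  sizes.sum = (query_ids.length : Int) ∧ ∀ s ∈ sizes, 0 ≤ s
instance (query_ids : List String) (sizes : List Int) : Decidable (Pre_build_query_id_to_partition query_ids sizes) := by
  unfold Pre_build_query_id_to_partition; infer_instance
def pvWitness_build_query_id_to_partition : List String × List Int := (["a", "b", "c"], [1, 2])

def Spec_build_query_id_to_partition (query_ids : List String) (sizes : List Int) (out : List (String × Int)) : Prop := out = build_query_id_to_partition_alt query_ids sizes
instance (query_ids : List String) (sizes : List Int) (out : List (String × Int)) : Decidable (Spec_build_query_id_to_partition query_ids sizes out) := by unfold Spec_build_query_id_to_partition; infer_instance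

-- ===== CLAIM (what is proved, stated in full; the proofs are below) =====
def Claim_equal_build_query_id_to_partition : Prop := ∀ (query_ids : List String) (sizes : List Int), Dom_build_query_id_to_partition query_ids sizes → Pre_build_query_id_to_partition query_ids sizes → Spec_build_query_id_to_partition query_ids sizes (build_query_id_to_partition query_ids sizes)

-- ===== LEMMAS AND PROOFS =====

-- proof-only recursive forms of Source B's prefix-sum array and of the flat label table
def pvCum (t : Int) : List Int → List Int
  | [] => []
  | sz :: tl => (t + sz) :: pvCum (t + sz) tl

def pvLabels (p0 : Int) : List Int → List Int
  | [] => []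
  | sz :: tl => List.replicate sz.toNat p0 ++ pvLabels (p0 + 1) tl

lemma pv_cum_foldl (sizes : List Int) (acc : List Int) (t : Int) :
    sizes.foldl (fun (st : List Int × Int) sz => (st.1 ++ [st.2 + sz], st.2 + sz)) (acc, t)
      = (acc ++ pvCum t sizes, t + sizes.sum) := by
  induction sizes generalizing acc t with
  | nil => simp [pvCum]
  | cons sz tl ih => simp [pvCum, ih, List.append_assoc]; omega

lemma pv_cum_length (t : Int) (sizes : List Int) : (pvCum t sizes).length = sizes.length := by
  induction sizes generalizing t with
  | nil => rfl
  | cons sz tl ih => simp [pvCum, ih]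

lemma pv_cum_ge (sizes : List Int) (hnn : ∀ s ∈ sizes, 0 ≤ s) (t : Int) (j : Nat)
    (hj : j < sizes.length) : t ≤ (pvCum t sizes).getD j 0 := by
  induction sizes generalizing t j with
  | nil => simp at hj
  | cons sz tl ih =>
      have hsz : 0 ≤ sz := hnn sz (by simp)
      cases j with
      | zero => simp [pvCum]; omega
      | succ j' =>
          have := ih (fun s hs => hnn s (by simp [hs])) (t + sz) j' (by simpa using hj)
          simp only [pvCum, List.getD_cons_succ]
          omega

lemma pv_cum_mono (sizes : List Int) (hnn : ∀ s ∈ sizes, 0 ≤ s) (t : Int) (j k : Nat)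
    (hjk : j ≤ k) (hk : k < sizes.length) :
    (pvCum t sizes).getD j 0 ≤ (pvCum t sizes).getD k 0 := by
  induction sizes generalizing t j k with
  | nil => simp at hk
  | cons sz tl ih =>
      have htl : ∀ s ∈ tl, 0 ≤ s := fun s hs => hnn s (by simp [hs])
      cases j with
      | zero =>
          cases k with
          | zero => exact le_refl _
          | succ k' =>
              have := pv_cum_ge tl htl (t + sz) k' (by simpa using hk)
              simp only [pvCum, List.getD_cons_zero, List.getD_cons_succ]
              omega
      | succ j' =>
          cases k with
          | zero => omega
          | succ k' =>
              simpa [pvCum] using ih htl (t + sz) j' k' (by omega) (by simpa using hk)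

lemma pv_labels_eq (sizes : List Int) (p0 : Int) :
    (PySem.List.enumerate sizes p0).flatMap
        (fun pr => (PySem.List.pyRange 0 pr.2 1).map (fun _ => pr.1))
      = pvLabels p0 sizes := by
  induction sizes generalizing p0 with
  | nil => simp [pvLabels, PySem.List.enumerate_nil]
  | cons sz tl ih =>
      rw [PySem.List.enumerate_cons]
      simp only [List.flatMap_cons, pvLabels, ih]
      congr 1
      rw [PySem.List.pyRange_one]
      simp [Function.comp_def, List.map_const']

lemma pv_labels_length (sizes : List Int) (hnn : ∀ s ∈ sizes, 0 ≤ s) (p0 : Int) :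
    ((pvLabels p0 sizes).length : Int) = sizes.sum := by
  induction sizes generalizing p0 with
  | nil => simp [pvLabels]
  | cons sz tl ih =>
      have hsz : 0 ≤ sz := hnn sz (by simp)
      have := ih (fun s hs => hnn s (by simp [hs])) (p0 + 1)
      simp only [pvLabels, List.length_append, List.length_replicate, List.sum_cons]
      push_cast
      omega

lemma pv_labels_char (sizes : List Int) (hnn : ∀ s ∈ sizes, 0 ≤ s) (i : Nat) (p0 t : Int)
    (hi : (i : Int) < sizes.sum) :
    p0 ≤ (pvLabels p0 sizes).getD i 0 ∧
    (pvLabels p0 sizes).getD i 0 - p0 < (sizes.length : Int) ∧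
    (∀ j : Nat, (j : Int) < (pvLabels p0 sizes).getD i 0 - p0 →
        (pvCum t sizes).getD j 0 ≤ t + i) ∧
    t + i < (pvCum t sizes).getD ((pvLabels p0 sizes).getD i 0 - p0).toNat 0 := by
  induction sizes generalizing i p0 t with
  | nil =>
      have : (0:Int) ≤ i := Int.natCast_nonneg i
      simp at hi; omega
  | cons sz tl ih =>
      have hsz : 0 ≤ sz := hnn sz (by simp)
      have htl : ∀ s ∈ tl, 0 ≤ s := fun s hs => hnn s (by simp [hs])
      by_cases hlt : i < sz.toNat
      · have hget : (pvLabels p0 (sz :: tl)).getD i 0 = p0 := by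
          simp only [pvLabels]
          rw [List.getD_eq_getElem?_getD, List.getElem?_append_left (by simpa using hlt)]
          simp [hlt]
        rw [hget]
        refine ⟨le_refl _, by simp, ?_, ?_⟩
        · intro j hj; omega
        · simp only [sub_self, Int.toNat_zero, pvCum, List.getD_cons_zero]
          omega
      · rw [not_lt] at hlt
        have hi' : ((i - sz.toNat : Nat) : Int) < tl.sum := by
          simp only [List.sum_cons] at hi
          omega
        have hget : (pvLabels p0 (sz :: tl)).getD i 0
            = (pvLabels (p0 + 1) tl).getD (i - sz.toNat) 0 := by
          simp only [pvLabels]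
          rw [List.getD_eq_getElem?_getD, List.getElem?_append_right (by simpa using hlt),
              ← List.getD_eq_getElem?_getD]
          simp
        obtain ⟨h1, h2, h3, h4⟩ := ih htl (i - sz.toNat) (p0 + 1) (t + sz) hi'
        have hti : t + sz + ((i - sz.toNat : Nat) : Int) = t + i := by omega
        rw [hti] at h3 h4
        rw [hget]
        set L := (pvLabels (p0 + 1) tl).getD (i - sz.toNat) 0 with hL
        refine ⟨by omega, by simp; omega, ?_, ?_⟩
        · intro j hj
          cases j with
          | zero => simp [pvCum]; omega
          | succ j' =>
              simp only [pvCum, List.getD_cons_succ]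
              exact h3 j' (by push_cast at hj ⊢; omega)
        · have hpos : 1 ≤ L - p0 := by omega
          have : (L - p0).toNat = (L - (p0 + 1)).toNat + 1 := by omega
          rw [this]
          simpa [pvCum] using h4

lemma pv_bsearch_spec (cum : List Int) (i : Int)
    (hmono : ∀ j k : Nat, j ≤ k → k < cum.length → cum.getD j 0 ≤ cum.getD k 0) :
    ∀ (lo hi : Int), 0 ≤ lo → lo ≤ hi → hi ≤ (cum.length : Int) →
    (∀ j : Nat, (j : Int) < lo → cum.getD j 0 ≤ i) →
    (∀ j : Nat, hi ≤ (j : Int) → j < cum.length → i < cum.getD j 0) →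
    0 ≤ pvBsearch cum i lo hi ∧ pvBsearch cum i lo hi ≤ (cum.length : Int) ∧
    (∀ j : Nat, (j : Int) < pvBsearch cum i lo hi → cum.getD j 0 ≤ i) ∧
    (∀ j : Nat, pvBsearch cum i lo hi ≤ (j : Int) → j < cum.length → i < cum.getD j 0) := by
  intro lo hi
  induction lo, hi using pvBsearch.induct cum i with
  | case1 lo hi hlt hle ih =>
      intro h0 _ hhi hlow hhigh
      have hmid1 := (PySem.Int.le_floordiv_iff_mul_le (a := lo + hi) (b := 2) (q := lo) (by omega)).2 (by omega)
      have hmid2 := (PySem.Int.floordiv_lt_iff_lt_mul (a := lo + hi) (b := 2) (q := hi) (by omega)).2 (by omega)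
      have hmr : (PySem.Int.floordiv (lo + hi) 2).toNat < cum.length := by omega
      rw [PySem.List.pyGetD_eq_getElem cum 0 (by omega) (by omega),
          ← List.getD_eq_getElem (d := 0) (hn := hmr)] at hle
      rw [pvBsearch, if_pos hlt, if_pos (by
        rw [PySem.List.pyGetD_eq_getElem cum 0 (by omega) (by omega),
            ← List.getD_eq_getElem (d := 0) (hn := hmr)]
        exact hle)]
      refine ih (by omega) (by omega) hhi ?_ hhigh
      intro j hj
      have := hmono j (PySem.Int.floordiv (lo + hi) 2).toNat (by omega) hmr
      omega
  | case2 lo hi hlt hgt ih =>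
      intro h0 hlh hhi hlow hhigh
      have hmid1 := (PySem.Int.le_floordiv_iff_mul_le (a := lo + hi) (b := 2) (q := lo) (by omega)).2 (by omega)
      have hmid2 := (PySem.Int.floordiv_lt_iff_lt_mul (a := lo + hi) (b := 2) (q := hi) (by omega)).2 (by omega)
      have hmr : (PySem.Int.floordiv (lo + hi) 2).toNat < cum.length := by omega
      rw [PySem.List.pyGetD_eq_getElem cum 0 (by omega) (by omega),
          ← List.getD_eq_getElem (d := 0) (hn := hmr)] at hgt
      rw [pvBsearch, if_pos hlt, if_neg (by
        rw [PySem.List.pyGetD_eq_getElem cum 0 (by omega) (by omega),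
            ← List.getD_eq_getElem (d := 0) (hn := hmr)]
        exact hgt)]
      refine ih h0 (by omega) (by omega) hlow ?_
      intro j hjm hjl
      have := hmono (PySem.Int.floordiv (lo + hi) 2).toNat j (by omega) hjl
      omega
  | case3 lo hi hnlt =>
      intro h0 hlh hhi hlow hhigh
      rw [pvBsearch, if_neg hnlt]
      exact ⟨h0, by omega, hlow, fun j hj hjl => hhigh j (by omega) hjl⟩

lemma pv_point (sizes : List Int) (hnn : ∀ s ∈ sizes, 0 ≤ s) (k : Nat)
    (hk : (k : Int) < sizes.sum) :
    pvBsearch (pvCum 0 sizes) (k : Int) 0 ((pvCum 0 sizes).length : Int)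
      = (pvLabels 0 sizes).getD k 0 := by
  have hmono : ∀ j k : Nat, j ≤ k → k < (pvCum 0 sizes).length →
      (pvCum 0 sizes).getD j 0 ≤ (pvCum 0 sizes).getD k 0 := by
    intro j k hjk hkl
    exact pv_cum_mono sizes hnn 0 j k hjk (by rwa [pv_cum_length] at hkl)
  obtain ⟨hr0, hr1, hr2, hr3⟩ := pv_bsearch_spec (pvCum 0 sizes) (k : Int) hmono 0
      ((pvCum 0 sizes).length : Int) (le_refl 0) (by positivity) (le_refl _)
      (by intro j hj; omega) (by intro j hj hjl; omega)
  obtain ⟨hL0, hL1, hL2, hL3⟩ := pv_labels_char sizes hnn k 0 0 hk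
  simp only [zero_add, sub_zero] at hL0 hL1 hL2 hL3
  set r := pvBsearch (pvCum 0 sizes) (k : Int) 0 ((pvCum 0 sizes).length : Int) with hr
  set L := (pvLabels 0 sizes).getD k 0 with hLd
  have hlen : ((pvCum 0 sizes).length : Int) = (sizes.length : Int) := by
    rw [pv_cum_length]
  rcases lt_trichotomy r L with h | h | h
  · have ha := hL2 r.toNat (by omega)
    have hb := hr3 r.toNat (by omega) (by omega)
    omega
  · exact h
  · have ha := hr2 L.toNat (by omega)
    omega

lemma pv_enum_fold (qs : List String) (g : Int → Int) :
    ∀ (i0 : Int) (d : PySem.Dict String Int),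
    (PySem.List.enumerate qs i0).foldl (fun d pr => d.insert pr.2 (g pr.1)) d
      = (qs.zip ((PySem.List.pyRange i0 (i0 + (qs.length : Int)) 1).map g)).foldl
          (fun (d : PySem.Dict String Int) pr => d.insert pr.1 pr.2) d := by
  induction qs with
  | nil => intro i0 d; simp [PySem.List.enumerate_nil]
  | cons q tl ih =>
      intro i0 d
      have hpos : i0 < i0 + ((q :: tl).length : Int) := by
        have : (0:Int) < ((q :: tl).length : Int) := by exact_mod_cast Nat.succ_pos tl.length
        omega
      rw [PySem.List.enumerate_cons, PySem.List.pyRange_one_cons hpos]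
      simp only [List.map_cons, List.zip_cons_cons, List.foldl_cons]
      have hbd : i0 + ((q :: tl).length : Int) = (i0 + 1) + (tl.length : Int) := by
        simp only [List.length_cons]; omega
      rw [hbd, ih (i0 + 1)]

lemma pv_map_const_pyRange (sz : Int) (p : Int) :
    (PySem.List.pyRange 0 sz 1).map (fun _ => p) = List.replicate sz.toNat p := by
  rw [PySem.List.pyRange_one]
  simp [Function.comp_def, List.map_const']

lemma pv_zip_replicate_foldl (seg : List String) (p : Int) (d : PySem.Dict String Int) :
    (seg.zip (List.replicate seg.length p)).foldl
        (fun (d : PySem.Dict String Int) pr => d.insert pr.1 pr.2) d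
      = seg.foldl (fun d q => d.insert q p) d := by
  induction seg generalizing d with
  | nil => rfl
  | cons q seg ih => simp [List.replicate_succ, ih]

lemma pv_inner (seg pre rest' : List String) (p : Int) (d : PySem.Dict String Int) :
    (PySem.List.pyRange (pre.length : Int) ((pre.length : Int) + (seg.length : Int)) 1).foldl
        (fun d k => d.insert (PySem.List.pyGetD (pre ++ seg ++ rest') k "") p) d
      = seg.foldl (fun d q => d.insert q p) d := by
  induction seg generalizing pre d with
  | nil => rw [PySem.List.pyRange_one_eq_nil (by simp)]; rfl
  | cons q seg ih =>
      rw [PySem.List.pyRange_one_cons (by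
        have : (0:Int) < ((q :: seg).length : Int) := by exact_mod_cast Nat.succ_pos seg.length
        omega)]
      simp only [List.foldl_cons]
      have hget : PySem.List.pyGetD (pre ++ (q :: seg) ++ rest') (pre.length : Int) "" = q := by
        rw [PySem.List.pyGetD_natCast]
        simp [List.getD]
      rw [hget]
      have h1 : ((pre.length : Int) + 1) = ((pre ++ [q]).length : Int) := by simp
      have h2 : (pre.length : Int) + ((q :: seg).length : Int) = ((pre ++ [q]).length : Int) + (seg.length : Int) := by
        simp; omega
      have h3 : pre ++ (q :: seg) ++ rest' = (pre ++ [q]) ++ seg ++ rest' := by simp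
      rw [h1, h2, h3, ih]

lemma pv_main (sizes : List Int) (h2 : ∀ s ∈ sizes, 0 ≤ s)
    (pre rest : List String) (h1 : sizes.sum = (rest.length : Int))
    (p0 : Int) (d : PySem.Dict String Int) :
    (PySem.List.enumerate sizes p0).foldl
        (fun (st : PySem.Dict String Int × Int) pr =>
          let e := st.2 + pr.2
          ((PySem.List.pyRange st.2 e 1).foldl
              (fun d k => d.insert (PySem.List.pyGetD (pre ++ rest) k "") pr.1) st.1,
           e))
        (d, (pre.length : Int))
      = ((rest.zip ((PySem.List.enumerate sizes p0).flatMap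
            (fun pr => (PySem.List.pyRange 0 pr.2 1).map (fun _ => pr.1)))).foldl
          (fun (d : PySem.Dict String Int) pr => d.insert pr.1 pr.2) d,
         (pre.length : Int) + sizes.sum) := by
  induction sizes generalizing pre rest p0 d with
  | nil =>
      simp at h1
      simp [PySem.List.enumerate_nil, h1]
  | cons sz tl ih =>
      have hsz : 0 ≤ sz := h2 sz (by simp)
      have htl : ∀ s ∈ tl, 0 ≤ s := fun s hs => h2 s (by simp [hs])
      have hszle : sz.toNat ≤ rest.length := by
        have := List.sum_nonneg htl
        simp [List.sum_cons] at h1; omega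
      set seg := rest.take sz.toNat with hseg
      set rest' := rest.drop sz.toNat with hrest'
      have hsegl : seg.length = sz.toNat := by simp [hseg, hszle]
      have hsplit : rest = seg ++ rest' := (List.take_append_drop _ _).symm
      rw [PySem.List.enumerate_cons]
      simp only [List.foldl_cons, List.flatMap_cons]
      have hbound : (pre.length : Int) + sz = (pre.length : Int) + (seg.length : Int) := by
        rw [hsegl]; omega
      have hlist : pre ++ rest = pre ++ seg ++ rest' := by rw [hsplit, List.append_assoc]
      have e1 : (pre.length : Int) + (seg.length : Int) = (((pre ++ seg).length : Int)) := by
        simp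
      have h1' : tl.sum = (rest'.length : Int) := by
        simp only [List.sum_cons] at h1
        simp only [hrest', List.length_drop]
        omega
      rw [hlist, hbound, pv_inner seg pre rest' p0 d, e1,
          ih htl (pre ++ seg) rest' h1' (p0 + 1) _]
      refine Prod.ext ?_ ?_
      · rw [pv_map_const_pyRange, ← hsegl, ← pv_zip_replicate_foldl seg p0 d, ← List.foldl_append]
        conv_rhs => rw [hsplit]
        rw [List.zip_append (by simp)]
      · show ((pre ++ seg).length : Int) + tl.sum = (pre.length : Int) + (sz :: tl).sum
        simp only [List.length_append, List.sum_cons, hsegl]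
        omega

lemma pv_bmap_eq_labels (sizes : List Int) (hnn : ∀ s ∈ sizes, 0 ≤ s) (n : Nat)
    (h1 : sizes.sum = (n : Int)) :
    (PySem.List.pyRange 0 (n : Int) 1).map
        (fun i => pvBsearch (pvCum 0 sizes) i 0 ((pvCum 0 sizes).length : Int))
      = pvLabels 0 sizes := by
  apply List.ext_getElem
  · have := pv_labels_length sizes hnn 0
    simp [PySem.List.length_pyRange_one]
    omega
  · intro k h1k h2k
    rw [List.getElem_map, PySem.List.getElem_pyRange_one]
    have hk : (k : Int) < sizes.sum := by
      rw [h1]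
      exact_mod_cast (by simpa [PySem.List.length_pyRange_one] using h1k)
    have hp := pv_point sizes hnn k hk
    rw [List.getD_eq_getElem (hn := h2k)] at hp
    simpa using hp

-- ===== VERDICT (by name: the statement is the Claim_ definition above) =====
theorem build_query_id_to_partition_spec : Claim_equal_build_query_id_to_partition := by
  intro query_ids sizes _ hpre
  obtain ⟨h1, h2⟩ := hpre
  unfold Spec_build_query_id_to_partition
  unfold build_query_id_to_partition build_query_id_to_partition_alt
  rw [if_pos h1, if_pos h1]
  -- A side: turn the range-over-partitions fold into the canonical fold over query_ids.zip labels
  have hA : (PySem.List.pyRange 0 (sizes.length : Int) 1).foldl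
      (fun (st : PySem.Dict String Int × Int) part_id =>
        let e := st.2 + PySem.List.pyGetD sizes part_id 0
        ((PySem.List.pyRange st.2 e 1).foldl
            (fun d k => d.insert (PySem.List.pyGetD query_ids k "") part_id) st.1,
         e))
      (PySem.Dict.empty, 0)
    = (PySem.List.enumerate sizes).foldl
      (fun (st : PySem.Dict String Int × Int) pr =>
        let e := st.2 + pr.2
        ((PySem.List.pyRange st.2 e 1).foldl
            (fun d k => d.insert (PySem.List.pyGetD query_ids k "") pr.1) st.1,
         e))
      (PySem.Dict.empty, 0) := by
    rw [PySem.List.enumerate_eq_map_pyRange sizes 0, List.foldl_map]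
    simp [PySem.List.len_eq]
  rw [hA]
  have hm := pv_main sizes h2 [] query_ids (by simpa using h1) 0 PySem.Dict.empty
  simp only [List.nil_append, List.length_nil, Int.natCast_zero] at hm
  rw [hm]
  -- B side: prefix-sum fold is pvCum, the enumerate fold is the canonical fold over the bsearch labels
  rw [pv_cum_foldl sizes [] 0]
  simp only [List.nil_append]
  rw [pv_enum_fold query_ids (fun i => pvBsearch (pvCum 0 sizes) i 0 ((pvCum 0 sizes).length : Int)) 0 PySem.Dict.empty]
  rw [zero_add, pv_bmap_eq_labels sizes h2 query_ids.length h1, pv_labels_eq sizes 0]
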